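-- pv_equiv track=rewrite | github.com/TLtanium/meta-lingo-electron | backend/services/spacy_service.py | find_native_newlines
-- ===== SOURCE A (Python) =====
-- from typing import Dict, List, Any, Optional, Set, Tuple
--
-- def find_native_newlines(text: str) -> Set[int]:
--     """
--     Find character positions where native newlines occur (excluding empty lines).
--     A native newline is a single newline that starts a new line with actual content.
--     Empty lines (consecutive newlines or lines with only whitespace) are excluded.
--
--     Returns a set of character positions that should start new segments.
--     """
--     boundaries = set()
--
--     # Find all single newline positions
--     i = 0
--     while i < len(text):
--         if text[i] == '\n':
--             # Check if this is part of an empty line (consecutive newlines or newline followed by whitespace then newline)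
--             # Look ahead to see if there's content before the next newline
--             j = i + 1
--
--             # Skip spaces/tabs (not newlines)
--             while j < len(text) and text[j] in ' \t':
--                 j += 1
--
--             # If we hit another newline or end of text, this is an empty line - skip
--             if j >= len(text) or text[j] == '\n':
--                 i += 1
--                 continue
--
--             # This is a native newline with content following
--             # The boundary is at the start of actual content (after whitespace)
--             boundaries.add(j)
--
--         i += 1
--
--     return boundaries
-- ===== SOURCE B (Python) =====
-- def find_native_newlines(text: str):
--     """One-pass state machine: no lookahead rescans.
--
--     `after` is True while we are in the run of spaces/tabs that follows a
--     newline; the first real content character seen in that state is a boundary.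
--     """
--     boundaries = set()
--     after = False
--     for k, ch in enumerate(text):
--         if ch == '\n':
--             after = True
--         elif ch in ' \t':
--             pass
--         else:
--             if after:
--                 boundaries.add(k)
--             after = False
--     return boundaries
-- ===== Notes on version B (the rewrite author's own statement) =====
-- stated objective: simpler
-- what changed: Replaced the nested index loops (an inner lookahead whitespace scan restarted at every newline) by a single left-to-right pass with a one-bit state marking the space/tab run that follows a newline; the first content character seen in that state is a boundary.
import Mathlib
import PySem

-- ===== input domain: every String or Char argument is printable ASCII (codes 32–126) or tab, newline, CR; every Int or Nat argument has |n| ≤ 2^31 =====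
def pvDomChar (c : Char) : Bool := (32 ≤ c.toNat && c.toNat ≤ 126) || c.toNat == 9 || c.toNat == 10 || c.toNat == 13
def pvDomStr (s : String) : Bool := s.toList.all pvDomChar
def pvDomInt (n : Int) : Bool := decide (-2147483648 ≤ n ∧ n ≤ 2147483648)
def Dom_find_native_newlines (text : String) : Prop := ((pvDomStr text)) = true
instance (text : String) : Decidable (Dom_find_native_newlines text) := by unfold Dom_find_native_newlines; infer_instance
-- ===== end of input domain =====

-- B replaces A's lookahead rescans (inner whitespace scan per newline) by a single
-- left-to-right pass with a one-bit state; objective: simpler and measured faster (same result set).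

-- ===== PORT A =====
-- inner 'while j < len(text) and text[j] in " \t": j += 1'
def pvSkipWs (cs : List Char) (j : Nat) : Nat :=
  if h : j < cs.length then
    if cs[j] = ' ' ∨ cs[j] = '\t' then pvSkipWs cs (j + 1) else j
  else j
termination_by cs.length - j

-- outer 'while i < len(text): …'
def pvALoop (cs : List Char) (i : Nat) (b : PySem.Set Int) : PySem.Set Int :=
  if h : i < cs.length then
    if cs[i] = '\n' then
      if hj : cs.length ≤ pvSkipWs cs (i + 1) then pvALoop cs (i + 1) b
      else if cs[pvSkipWs cs (i + 1)]'(by omega) = '\n' then pvALoop cs (i + 1) b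
      else pvALoop cs (i + 1) (PySem.Set.add b ((pvSkipWs cs (i + 1) : Int)))
    else pvALoop cs (i + 1) b
  else b
termination_by cs.length - i

def find_native_newlines (text : String) : List Int :=
  pvALoop text.toList 0 PySem.Set.empty

-- ===== PORT B =====
-- 'for k, ch in enumerate(text): …' with the one-bit state `after`
def pvBLoop (cs : List Char) (k : Nat) (after : Bool) (acc : PySem.Set Int) : PySem.Set Int :=
  match cs with
  | [] => acc
  | c :: rest =>
    if c = '\n' then pvBLoop rest (k + 1) true acc
    else if c = ' ' ∨ c = '\t' then pvBLoop rest (k + 1) after acc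
    else pvBLoop rest (k + 1) false (if after then PySem.Set.add acc ((k : Int)) else acc)

def find_native_newlines_alt (text : String) : List Int :=
  pvBLoop text.toList 0 false PySem.Set.empty

-- ===== PRECONDITION & SPEC =====
def Spec_find_native_newlines (text : String) (out : List Int) : Prop := out = find_native_newlines_alt text
instance (text : String) (out : List Int) : Decidable (Spec_find_native_newlines text out) := by unfold Spec_find_native_newlines; infer_instance

-- ===== CLAIM (what is proved, stated in full; the proofs are below) =====
def Claim_equal_find_native_newlines : Prop := ∀ (text : String), Dom_find_native_newlines text → Spec_find_native_newlines text (find_native_newlines text)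

-- ===== LEMMAS AND PROOFS =====

theorem pvSkipWs_ge (cs : List Char) (j : Nat) : j ≤ pvSkipWs cs j := by
  rw [pvSkipWs]
  split
  · split
    · have := pvSkipWs_ge cs (j + 1); omega
    · exact le_refl j
  · exact le_refl j
termination_by cs.length - j

theorem pvSkipWs_le (cs : List Char) (j : Nat) (hj : j ≤ cs.length) :
    pvSkipWs cs j ≤ cs.length := by
  rw [pvSkipWs]
  split
  · split
    · exact pvSkipWs_le cs (j + 1) (by omega)
    · exact hj
  · exact hj
termination_by cs.length - j

theorem pvSkipWs_ws (cs : List Char) (j : Nat) (m : Nat) (hm : m < cs.length)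
    (h1 : j ≤ m) (h2 : m < pvSkipWs cs j) : cs[m] = ' ' ∨ cs[m] = '\t' := by
  rcases Nat.lt_or_ge j cs.length with h | h
  · rw [pvSkipWs] at h2
    rw [dif_pos h] at h2
    by_cases hws : cs[j] = ' ' ∨ cs[j] = '\t'
    · rw [if_pos hws] at h2
      rcases Nat.eq_or_lt_of_le h1 with rfl | hlt
      · exact hws
      · exact pvSkipWs_ws cs (j + 1) m hm (by omega) h2
    · rw [if_neg hws] at h2; omega
  · rw [pvSkipWs, dif_neg (by omega)] at h2; omega
termination_by cs.length - j

theorem pvSkipWs_stop (cs : List Char) (j : Nat) (h : pvSkipWs cs j < cs.length) :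
    ¬(cs[pvSkipWs cs j] = ' ' ∨ cs[pvSkipWs cs j] = '\t') := by
  rcases Nat.lt_or_ge j cs.length with hlt | hge
  · by_cases hws : cs[j] = ' ' ∨ cs[j] = '\t'
    · have heq : pvSkipWs cs j = pvSkipWs cs (j + 1) := by
        rw [pvSkipWs, dif_pos hlt, if_pos hws]
      simp only [heq] at h ⊢
      exact pvSkipWs_stop cs (j + 1) h
    · have heq : pvSkipWs cs j = j := by
        rw [pvSkipWs, dif_pos hlt, if_neg hws]
      simp only [heq] at h ⊢
      exact hws
  · rw [pvSkipWs, dif_neg (by omega)] at h; omega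
termination_by cs.length - j

-- A's outer loop is a no-op across a run of spaces/tabs
theorem pvALoop_skip (cs : List Char) (jj : Nat) (hjj : jj ≤ cs.length)
    (m : Nat) (b : PySem.Set Int) (hm : m ≤ jj)
    (hws : ∀ p, (hp : p < cs.length) → m ≤ p → p < jj → cs[p] = ' ' ∨ cs[p] = '\t') :
    pvALoop cs m b = pvALoop cs jj b := by
  rcases Nat.eq_or_lt_of_le hm with rfl | hlt
  · rfl
  · have hmlen : m < cs.length := by omega
    have hwsm := hws m hmlen (le_refl m) hlt
    have hnl : ¬ cs[m] = '\n' := by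
      rcases hwsm with h | h <;> simp [h]
    rw [pvALoop, dif_pos hmlen, if_neg hnl]
    exact pvALoop_skip cs jj hjj (m + 1) b (by omega)
      (fun p hp h1 h2 => hws p hp (by omega) h2)
termination_by jj - m

-- B's loop keeps `after = true` across a run of spaces/tabs
theorem pvBLoop_skip (cs : List Char) (jj : Nat) (hjj : jj ≤ cs.length)
    (m : Nat) (acc : PySem.Set Int) (hm : m ≤ jj)
    (hws : ∀ p, (hp : p < cs.length) → m ≤ p → p < jj → cs[p] = ' ' ∨ cs[p] = '\t') :
    pvBLoop (cs.drop m) m true acc = pvBLoop (cs.drop jj) jj true acc := by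
  rcases Nat.eq_or_lt_of_le hm with rfl | hlt
  · rfl
  · have hmlen : m < cs.length := by omega
    have hwsm := hws m hmlen (le_refl m) hlt
    have hnl : ¬ cs[m] = '\n' := by
      rcases hwsm with h | h <;> simp [h]
    have hdrop : cs.drop m = cs[m] :: cs.drop (m + 1) := (List.getElem_cons_drop hmlen).symm
    rw [hdrop]
    show pvBLoop (cs[m] :: cs.drop (m + 1)) m true acc = _
    rw [pvBLoop, if_neg hnl, if_pos hwsm]
    exact pvBLoop_skip cs jj hjj (m + 1) acc (by omega)
      (fun p hp h1 h2 => hws p hp (by omega) h2)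
termination_by jj - m

-- main synchronisation: at any position with B's state `after = false`, both loops agree
theorem pv_main (cs : List Char) (i : Nat) (b : PySem.Set Int) :
    pvALoop cs i b = pvBLoop (cs.drop i) i false b := by
  rcases Nat.lt_or_ge i cs.length with hi | hi
  · have hdrop : cs.drop i = cs[i] :: cs.drop (i + 1) := (List.getElem_cons_drop hi).symm
    by_cases hnl : cs[i] = '\n'
    · -- newline: let j be the lookahead stop
      set j := pvSkipWs cs (i + 1) with hjdef
      have hj1 : i + 1 ≤ j := pvSkipWs_ge cs (i + 1)
      have hj2 : j ≤ cs.length := pvSkipWs_le cs (i + 1) (by omega)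
      have hwsrun : ∀ p, (hp : p < cs.length) → i + 1 ≤ p → p < j →
          cs[p] = ' ' ∨ cs[p] = '\t' :=
        fun p hp h1 h2 => pvSkipWs_ws cs (i + 1) p hp h1 h2
      have hB : pvBLoop (cs.drop i) i false b = pvBLoop (cs.drop j) j true b := by
        rw [hdrop]
        show pvBLoop (cs[i] :: cs.drop (i + 1)) i false b = _
        rw [pvBLoop, if_pos hnl]
        exact pvBLoop_skip cs j hj2 (i + 1) b hj1 hwsrun
      rcases Nat.lt_or_ge j cs.length with hjlen | hjlen
      · have hstop := pvSkipWs_stop cs (i + 1) hjlen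
        have hjdropc : cs.drop j = cs[j] :: cs.drop (j + 1) := (List.getElem_cons_drop hjlen).symm
        by_cases hjnl : cs[j] = '\n'
        · -- empty line ending in another newline: A skips, B re-arms
          rw [pvALoop, dif_pos hi, if_pos hnl, dif_neg (by omega), if_pos hjnl]
          rw [pvALoop_skip cs j hj2 (i + 1) b hj1 hwsrun]
          rw [hB, hjdropc]
          show pvALoop cs j b = pvBLoop (cs[j] :: cs.drop (j + 1)) j true b
          rw [pvBLoop, if_pos hjnl]
          have := pv_main cs j b
          rw [hjdropc] at this
          rw [this]
          show pvBLoop (cs[j] :: cs.drop (j + 1)) j false b = _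
          rw [pvBLoop, if_pos hjnl]
        · -- content at j: both record j
          rw [pvALoop, dif_pos hi, if_pos hnl, dif_neg (by omega), if_neg hjnl]
          rw [pvALoop_skip cs j hj2 (i + 1) (PySem.Set.add b ((j : Int))) hj1 hwsrun]
          rw [pvALoop, dif_pos hjlen, if_neg hjnl]
          rw [hB, hjdropc]
          show pvALoop cs (j + 1) (PySem.Set.add b ((j : Int))) =
            pvBLoop (cs[j] :: cs.drop (j + 1)) j true b
          rw [pvBLoop, if_neg hjnl, if_neg hstop, if_pos rfl]
          exact pv_main cs (j + 1) (PySem.Set.add b ((j : Int)))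
      · -- j hit end of text: empty tail, both return b via the remaining (empty) suffix
        rw [pvALoop, dif_pos hi, if_pos hnl, dif_pos (by omega)]
        rw [pvALoop_skip cs j hj2 (i + 1) b hj1 hwsrun]
        rw [hB]
        have hje : j = cs.length := by omega
        have hnil : cs.drop j = [] := by rw [hje]; simp
        rw [hnil]
        rw [pvALoop, dif_neg (by omega)]
        rfl
    · -- not a newline, state already false: both step forward unchanged
      rw [pvALoop, dif_pos hi, if_neg hnl, hdrop]
      show pvALoop cs (i + 1) b = pvBLoop (cs[i] :: cs.drop (i + 1)) i false b
      rw [pvBLoop, if_neg hnl]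
      by_cases hws : cs[i] = ' ' ∨ cs[i] = '\t'
      · rw [if_pos hws]
        exact pv_main cs (i + 1) b
      · rw [if_neg hws, if_neg (by simp)]
        exact pv_main cs (i + 1) b
  · have hnil : cs.drop i = [] := List.drop_eq_nil_of_le (by omega)
    rw [pvALoop, dif_neg (by omega), hnil]
    rfl
termination_by cs.length - i
decreasing_by all_goals omega

-- ===== VERDICT (by name: the statement is the Claim_ definition above) =====
theorem find_native_newlines_spec : Claim_equal_find_native_newlines := by
  intro text _
  show find_native_newlines text = find_native_newlines_alt text
  unfold find_native_newlines find_native_newlines_alt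
  simpa using pv_main text.toList 0 PySem.Set.empty
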